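-- pv_equiv track=rewrite | github.com/nablarch/nabledge-dev | .work/00299/generate_hints.py | _deepest_match
-- ===== SOURCE A (Python) =====
-- def _deepest_match(
--     candidate: str, headings: list[tuple[int, str, int]]
-- ) -> str | None:
--     """Return the heading title equal to `candidate`, preferring deeper level."""
--     matches = [(lvl, title) for (lvl, title, _) in headings if title == candidate]
--     if not matches:
--         return None
--     matches.sort(key=lambda p: -p[0])
--     return matches[0][1]
-- ===== SOURCE B (Python) =====
-- def _deepest_match(
--     candidate: str, headings: list[tuple[int, str, int]]
-- ) -> str | None:
--     """Return the heading title equal to `candidate`, preferring deeper level."""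
--     # Every match's title IS `candidate`, so a short-circuiting membership scan suffices.
--     return candidate if any(title == candidate for (_, title, _) in headings) else None
-- ===== Notes on version B (the rewrite author's own statement) =====
-- stated objective: simpler
-- what changed: B replaces filter-then-sort-then-index with a single short-circuiting membership scan, since every matched title equals candidate and the sort is dead work.
import Mathlib
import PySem

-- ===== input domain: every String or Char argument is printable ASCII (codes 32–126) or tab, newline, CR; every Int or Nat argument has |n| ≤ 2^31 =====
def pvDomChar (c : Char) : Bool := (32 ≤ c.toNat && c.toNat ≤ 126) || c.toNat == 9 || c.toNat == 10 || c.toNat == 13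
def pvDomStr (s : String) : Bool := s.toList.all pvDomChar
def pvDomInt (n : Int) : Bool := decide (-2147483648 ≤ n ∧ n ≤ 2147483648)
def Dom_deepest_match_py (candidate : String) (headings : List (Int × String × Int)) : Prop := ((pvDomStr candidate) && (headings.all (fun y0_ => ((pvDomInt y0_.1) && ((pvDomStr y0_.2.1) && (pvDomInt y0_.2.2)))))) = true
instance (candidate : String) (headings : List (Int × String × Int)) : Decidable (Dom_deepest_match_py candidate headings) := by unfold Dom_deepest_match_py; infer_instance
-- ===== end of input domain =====

-- B replaces A's filter-then-sort-then-index with one short-circuiting membership scan (simpler; every matched title equals candidate).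

-- ===== PORT A =====
def deepest_match_py (candidate : String) (headings : List (Int × String × Int)) : Option String :=
  let ms := headings.filterMap (fun t => if t.2.1 == candidate then some (t.1, t.2.1) else none)
  if ms.isEmpty then none
  else
    match PySem.List.pyGet? (PySem.List.sorted ms (fun p => -p.1) false) 0 with
    | some p => some p.2
    | none => none

-- ===== PORT B =====
def deepest_match_py_alt (candidate : String) (headings : List (Int × String × Int)) : Option String :=
  if headings.any (fun t => t.2.1 == candidate) then some candidate else none

-- ===== PRECONDITION & SPEC =====
def Spec_deepest_match_py (candidate : String) (headings : List (Int × String × Int)) (out : Option String) : Prop := out = deepest_match_py_alt candidate headings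
instance (candidate : String) (headings : List (Int × String × Int)) (out : Option String) : Decidable (Spec_deepest_match_py candidate headings out) := by unfold Spec_deepest_match_py; infer_instance

-- ===== CLAIM (what is proved, stated in full; the proofs are below) =====
def Claim_equal_deepest_match_py : Prop := ∀ (candidate : String) (headings : List (Int × String × Int)), Dom_deepest_match_py candidate headings → Spec_deepest_match_py candidate headings (deepest_match_py candidate headings)

-- ===== LEMMAS AND PROOFS =====

-- every element of A's `matches` list carries `candidate` as its title
theorem matches_snd (candidate : String) (headings : List (Int × String × Int))
    (p : Int × String)
    (hp : p ∈ headings.filterMap (fun t => if t.2.1 == candidate then some (t.1, t.2.1) else none)) :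
    p.2 = candidate := by
  rcases List.mem_filterMap.mp hp with ⟨t, _, ht⟩
  by_cases h : t.2.1 == candidate
  · simp [h] at ht; subst ht; exact eq_of_beq h
  · simp [h] at ht

-- `matches` is empty iff no heading title equals candidate
theorem matches_empty_iff (candidate : String) (headings : List (Int × String × Int)) :
    headings.filterMap (fun t => if t.2.1 == candidate then some (t.1, t.2.1) else none) = []
      ↔ headings.any (fun t => t.2.1 == candidate) = false := by
  simp only [List.filterMap_eq_nil_iff, List.any_eq_false]
  constructor
  · intro h t ht
    have := h t ht
    by_cases hb : t.2.1 == candidate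
    · simp [hb] at this
    · simpa using hb
  · intro h t ht
    simp [show (t.2.1 == candidate) = false by simpa using h t ht]

-- ===== VERDICT (by name: the statement is the Claim_ definition above) =====
theorem deepest_match_py_spec : Claim_equal_deepest_match_py := by
  intro candidate headings _
  unfold Spec_deepest_match_py deepest_match_py deepest_match_py_alt
  set ms := headings.filterMap (fun t => if t.2.1 == candidate then some (t.1, t.2.1) else none) with hms
  by_cases he : ms = []
  · have hany : headings.any (fun t => t.2.1 == candidate) = false :=
      (matches_empty_iff candidate headings).mp (hms ▸ he)
    simp [he, hany]
  · have hany : headings.any (fun t => t.2.1 == candidate) = true := by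
      by_contra h
      exact he ((matches_empty_iff candidate headings).mpr (Bool.eq_false_iff.mpr h) ▸ hms)
    have hlen : (PySem.List.sorted ms (fun p => -p.1) false).length = ms.length :=
      PySem.List.length_sorted ..
    cases hs : PySem.List.sorted ms (fun p => -p.1) false with
    | nil =>
      exfalso
      exact he (List.length_eq_zero_iff.mp (by rw [← hlen, hs]; rfl))
    | cons p rest =>
      have hpmem : p ∈ ms := (PySem.List.mem_sorted ..).mp (hs ▸ List.mem_cons_self ..)
      have hp2 : p.2 = candidate := matches_snd candidate headings p (hms ▸ hpmem)
      simp [he, hs, hany, PySem.List.pyGet?, PySem.List.pyIdx?, hp2]
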